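-- pv_equiv track=rewrite | github.com/dalekov/SoftUni-Advanced | 05_Functions_Advanced/Exercise/01_negative_vs_positive.py | function
-- ===== SOURCE A (Python) =====
-- def function(nums: list) -> str:
--     nums = list(map(int, nums))
--     negatives = [num for num in nums if num < 0]
--     positives = [num for num in nums if num > 0]
--     string = None
--
--     if abs(sum(negatives)) > sum(positives):
--         string = "The negatives are stronger than the positives"
--     elif sum(positives) > abs(sum(negatives)):
--         string = "The positives are stronger than the negatives"
--
--
--     return f"{sum(negatives)}\n{sum(positives)}\n{string}" if string else None
-- ===== SOURCE B (Python) =====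
-- def function(nums: list) -> str:
--     vals = [int(x) for x in nums]
--     s = sum(vals)
--     t = sum(abs(v) for v in vals)
--     if s == 0:
--         return None
--     neg = (s - t) // 2
--     pos = (s + t) // 2
--     verdict = ("The negatives are stronger than the positives" if s < 0
--                else "The positives are stronger than the negatives")
--     return f"{neg}\n{pos}\n{verdict}"
-- ===== Notes on version B (the rewrite author's own statement) =====
-- stated objective: alternative
-- what changed: Instead of filtering negatives/positives and comparing their sums, B computes only the total sum S and the sum of absolute values T, recovers the two sums by the identities neg=(S-T)/2 and pos=(S+T)/2, and decides the verdict by the sign of S alone (negatives stronger iff S<0, tie iff S=0).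
import Mathlib
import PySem

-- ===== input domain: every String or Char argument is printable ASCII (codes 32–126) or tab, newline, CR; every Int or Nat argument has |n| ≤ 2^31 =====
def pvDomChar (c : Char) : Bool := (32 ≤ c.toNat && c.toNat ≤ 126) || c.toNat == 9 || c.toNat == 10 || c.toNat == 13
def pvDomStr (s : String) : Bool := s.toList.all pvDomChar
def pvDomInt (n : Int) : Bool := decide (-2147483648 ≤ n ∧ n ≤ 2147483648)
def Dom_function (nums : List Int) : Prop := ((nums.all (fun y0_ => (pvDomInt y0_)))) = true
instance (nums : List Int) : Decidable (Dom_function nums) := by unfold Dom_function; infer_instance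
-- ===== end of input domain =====

-- B computes total sum S and sum of absolute values T and recovers the two sums
-- via neg=(S-T)//2, pos=(S+T)//2, deciding the verdict by the sign of S alone.

-- ===== PORT A =====
def function (nums : List Int) : Option String :=
  let negatives := nums.filter (fun num => num < 0)
  let positives := nums.filter (fun num => num > 0)
  let string : Option String :=
    if |negatives.sum| > positives.sum then
      some "The negatives are stronger than the positives"
    else if positives.sum > |negatives.sum| then
      some "The positives are stronger than the negatives"
    else none
  match string with
  | some s => some (PySem.Int.toStr negatives.sum ++ "\n" ++ PySem.Int.toStr positives.sum ++ "\n" ++ s)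
  | none => none

-- ===== PORT B =====
def function_alt (nums : List Int) : Option String :=
  let s := nums.sum
  let t := (nums.map (fun v => |v|)).sum
  if s = 0 then none
  else
    let neg := PySem.Int.floordiv (s - t) 2
    let pos := PySem.Int.floordiv (s + t) 2
    let verdict := if s < 0 then "The negatives are stronger than the positives"
                   else "The positives are stronger than the negatives"
    some (PySem.Int.toStr neg ++ "\n" ++ PySem.Int.toStr pos ++ "\n" ++ verdict)

-- ===== PRECONDITION & SPEC =====
def Spec_function (nums : List Int) (out : Option String) : Prop := out = function_alt nums
instance (nums : List Int) (out : Option String) : Decidable (Spec_function nums out) := by unfold Spec_function; infer_instance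

-- ===== CLAIM (what is proved, stated in full; the proofs are below) =====
def Claim_equal_function : Prop := ∀ (nums : List Int), Dom_function nums → Spec_function nums (function nums)

-- ===== LEMMAS AND PROOFS =====

-- sum = (negatives sum) + (positives sum); sum of |·| = (positives sum) - (negatives sum)
theorem pv_sum_split (nums : List Int) :
    nums.sum = (nums.filter (fun num => num < 0)).sum + (nums.filter (fun num => num > 0)).sum ∧
    (nums.map (fun v => |v|)).sum = (nums.filter (fun num => num > 0)).sum - (nums.filter (fun num => num < 0)).sum := by
  induction nums with
  | nil => simp
  | cons x xs ih =>
    obtain ⟨h1, h2⟩ := ih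
    by_cases hx : x < 0
    · have hx' : ¬ x > 0 := by omega
      have : |x| = -x := abs_of_neg hx
      simp [List.filter, hx, hx', h1, h2, this]
      constructor <;> ring
    · by_cases hx2 : x > 0
      · have : |x| = x := abs_of_pos hx2
        simp [List.filter, hx, hx2, h1, h2, this]
        constructor <;> ring
      · have hx0 : x = 0 := by omega
        simp [List.filter, hx0, h1, h2]

theorem pv_fdiv_two_mul (n : Int) : PySem.Int.floordiv (2 * n) 2 = n := by
  rw [PySem.Int.floordiv_eq_ediv_of_pos (by omega)]
  omega

-- performs the final rewriting once the two filtered sums are abstracted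
theorem pv_main (S T N P : Int) (h1 : S = N + P) (h2 : T = P - N)
    (hNle : N ≤ 0) :
    (match
      (if |N| > P then some "The negatives are stronger than the positives"
       else if P > |N| then some "The positives are stronger than the negatives"
       else (none : Option String)) with
    | some s => some (PySem.Int.toStr N ++ "\n" ++ PySem.Int.toStr P ++ "\n" ++ s)
    | none => none) =
    (if S = 0 then none
     else some (PySem.Int.toStr (PySem.Int.floordiv (S - T) 2) ++ "\n" ++
                PySem.Int.toStr (PySem.Int.floordiv (S + T) 2) ++ "\n" ++
                (if S < 0 then "The negatives are stronger than the positives"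
                 else "The positives are stronger than the negatives"))) := by
  subst h1 h2
  rw [abs_of_nonpos hNle]
  have e1 : N + P - (P - N) = 2 * N := by ring
  have e2 : N + P + (P - N) = 2 * P := by ring
  rw [e1, e2, pv_fdiv_two_mul, pv_fdiv_two_mul]
  by_cases hc1 : -N > P
  · have hs : ¬ (N + P = 0) := by omega
    have hs2 : N + P < 0 := by omega
    simp [hc1, hs, hs2]
  · by_cases hc2 : P > -N
    · have hs : ¬ (N + P = 0) := by omega
      have hs2 : ¬ (N + P < 0) := by omega
      simp [hc1, hc2, hs, hs2]
    · have hs : N + P = 0 := by omega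
      simp [hc1, hc2, hs]

theorem pv_negsum_nonpos (nums : List Int) :
    (nums.filter (fun num => num < 0)).sum ≤ 0 := by
  induction nums with
  | nil => simp
  | cons x xs ih =>
    by_cases hx : x < 0
    · simp [List.filter, hx]; omega
    · simp [List.filter, hx, ih]

-- ===== VERDICT (by name: the statement is the Claim_ definition above) =====
theorem function_spec : Claim_equal_function := by
  intro nums _
  show function nums = function_alt nums
  obtain ⟨h1, h2⟩ := pv_sum_split nums
  have hNle := pv_negsum_nonpos nums
  unfold function function_alt
  exact pv_main _ _ _ _ h1 h2 hNle
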